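-- pv_equiv track=rewrite | github.com/dollythedog/project_wizard | app/utils/parsers.py | parse_charter_to_form_data
-- ===== SOURCE A (Python) =====
-- def parse_charter_to_form_data(charter_text: str) -> dict:
--     """
--     Extract form data from existing charter text.
--
--     Parses a PROJECT_CHARTER.md file and extracts key-value pairs
--     for form fields based on markdown structure.
--
--     Args:
--         charter_text: Raw charter markdown text
--
--     Returns:
--         Dictionary mapping field names to their values
--     """
--     data = {}
--     lines = charter_text.split("\n")
--
--     # Simple parsing - look for headers and content
--     current_section = None
--     content_buffer = []
--
--     for line in lines:
--         if line.startswith("# Project Charter:"):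
--             data["project_title"] = line.replace("# Project Charter:", "").strip()
--         elif line.startswith("**Project Owner:**"):
--             data["project_owner"] = line.replace("**Project Owner:**", "").strip()
--         elif line.startswith("**Project Type:**"):
--             data["project_type"] = line.replace("**Project Type:**", "").strip()
--         elif line.startswith("## "):
--             # Save previous section
--             if current_section and content_buffer:
--                 data[current_section] = "\n".join(content_buffer).strip()
--             # Start new section
--             section_name = line.replace("##", "").strip().lower().replace(" ", "_")
--             current_section = section_name
--             content_buffer = []
--         elif current_section and line.strip():
--             content_buffer.append(line)
--
--     # Save last section
--     if current_section and content_buffer: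
--         data[current_section] = "\n".join(content_buffer).strip()
--
--     return data
-- ===== SOURCE B (Python) =====
-- def parse_charter_to_form_data(charter_text: str) -> dict:
--     """Block-partition re-implementation: split into header-delimited blocks,
--     handle the three special prefix lines separately, filter+join block content."""
--     lines = charter_text.split("\n")
--     data = {}
--
--     def is_header(line):
--         return line.startswith("## ")
--
--     def special(line):
--         for prefix, key in (("# Project Charter:", "project_title"),
--                             ("**Project Owner:**", "project_owner"),
--                             ("**Project Type:**", "project_type")):
--             if line.startswith(prefix):
--                 return key, line.replace(prefix, "").strip()
--         return None
--
--     def apply_specials(block):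
--         for line in block:
--             hit = special(line)
--             if hit is not None:
--                 data[hit[0]] = hit[1]
--
--     def split_at_header(seq):
--         for i, line in enumerate(seq):
--             if is_header(line):
--                 return seq[:i], seq[i:]
--         return seq, []
--
--     prelude, rest = split_at_header(lines)
--     apply_specials(prelude)
--     while rest:
--         header, rest = rest[0], rest[1:]
--         body, rest = split_at_header(rest)
--         apply_specials(body)
--         content = [l for l in body if special(l) is None and l.strip()]
--         key = header.replace("##", "").strip().lower().replace(" ", "_")
--         if key and content:
--             data[key] = "\n".join(content).strip()
--     return data
-- ===== Notes on version B (the rewrite author's own statement) =====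
-- stated objective: alternative
-- what changed: Replaces A's single-pass line state machine (current_section/content_buffer mutable state) with a block-partition decomposition: span the line list at markdown section-header lines, then per block apply the three special-prefix assignments and build the section value by filter+join.
import Mathlib
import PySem

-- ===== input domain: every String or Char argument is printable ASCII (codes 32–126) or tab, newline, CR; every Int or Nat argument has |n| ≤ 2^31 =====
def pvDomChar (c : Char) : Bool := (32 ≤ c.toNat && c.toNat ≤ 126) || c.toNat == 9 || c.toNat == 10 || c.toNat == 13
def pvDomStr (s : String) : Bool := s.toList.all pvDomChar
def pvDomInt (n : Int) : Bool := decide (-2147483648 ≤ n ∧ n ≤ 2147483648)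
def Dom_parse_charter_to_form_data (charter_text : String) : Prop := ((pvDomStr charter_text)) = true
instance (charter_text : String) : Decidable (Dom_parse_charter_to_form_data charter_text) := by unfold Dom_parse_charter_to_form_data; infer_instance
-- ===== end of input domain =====

-- B replaces A's line-by-line state machine by a header-block partition (span at '## ', filter+join per block); same values, no speed claim.

-- ===== PORT A =====
-- Python truthiness of `current_section` (None or str): nonempty string.
def pvTruthy (o : Option String) : Bool :=
  match o with
  | none => false
  | some s => !(s == "")

-- A's duplicated flush fragment: `if current_section and content_buffer: data[current_section] = "\n".join(content_buffer).strip()`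
def pvFlushA (st : PySem.Dict String String × Option String × List String) : PySem.Dict String String :=
  if pvTruthy st.2.1 && !(st.2.2 == []) then
    st.1.insert (st.2.1.getD "") (PySem.Str.strip (PySem.Str.join "\n" st.2.2))
  else st.1

def pvStepA (st : PySem.Dict String String × Option String × List String) (line : String) :
    PySem.Dict String String × Option String × List String :=
  let (data, cur, buf) := st
  if PySem.Str.startswith line "# Project Charter:" then
    (data.insert "project_title" (PySem.Str.strip (PySem.Str.replace line "# Project Charter:" "")), cur, buf)
  else if PySem.Str.startswith line "**Project Owner:**" then
    (data.insert "project_owner" (PySem.Str.strip (PySem.Str.replace line "**Project Owner:**" "")), cur, buf)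
  else if PySem.Str.startswith line "**Project Type:**" then
    (data.insert "project_type" (PySem.Str.strip (PySem.Str.replace line "**Project Type:**" "")), cur, buf)
  else if PySem.Str.startswith line "## " then
    let data := pvFlushA (data, cur, buf)
    let section_name := PySem.Str.replace (PySem.Str.lower (PySem.Str.strip (PySem.Str.replace line "##" ""))) " " "_"
    (data, some section_name, [])
  else if pvTruthy cur && !(PySem.Str.strip line == "") then
    (data, cur, buf ++ [line])
  else
    (data, cur, buf)

def parse_charter_to_form_data (charter_text : String) : List (String × String) :=
  let lines := (PySem.Str.split? charter_text "\n").getD []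
  let st := lines.foldl pvStepA (PySem.Dict.empty, none, [])
  (pvFlushA st).items

-- ===== PORT B =====
def pvIsHeader (line : String) : Bool := PySem.Str.startswith line "## "

def pvSpecial (line : String) : Option (String × String) :=
  if PySem.Str.startswith line "# Project Charter:" then
    some ("project_title", PySem.Str.strip (PySem.Str.replace line "# Project Charter:" ""))
  else if PySem.Str.startswith line "**Project Owner:**" then
    some ("project_owner", PySem.Str.strip (PySem.Str.replace line "**Project Owner:**" ""))
  else if PySem.Str.startswith line "**Project Type:**" then
    some ("project_type", PySem.Str.strip (PySem.Str.replace line "**Project Type:**" ""))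
  else none

def pvApplySpecials (data : PySem.Dict String String) (block : List String) : PySem.Dict String String :=
  block.foldl (fun d l => match pvSpecial l with
    | some (k, v) => d.insert k v
    | none => d) data

def pvKeep (line : String) : Bool := pvSpecial line == none && !(PySem.Str.strip line == "")

def pvSecKey (header : String) : String :=
  PySem.Str.replace (PySem.Str.lower (PySem.Str.strip (PySem.Str.replace header "##" ""))) " " "_"

-- `if key and content: data[key] = "\n".join(content).strip()`
def pvFlushB (data : PySem.Dict String String) (key : String) (content : List String) : PySem.Dict String String :=
  if !(key == "") && !(content == []) then
    data.insert key (PySem.Str.strip (PySem.Str.join "\n" content))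
  else data

def pvSections (data : PySem.Dict String String) : List String → PySem.Dict String String
  | [] => data
  | header :: rest =>
    let body := rest.takeWhile (fun l => !pvIsHeader l)
    let rest' := rest.dropWhile (fun l => !pvIsHeader l)
    let data' := pvApplySpecials data body
    let content := body.filter pvKeep
    pvSections (pvFlushB data' (pvSecKey header) content) rest'
termination_by ls => ls.length
decreasing_by
  have := List.length_dropWhile_le (fun l => !pvIsHeader l) rest
  simp only [List.length_cons]; omega

def parse_charter_to_form_data_alt (charter_text : String) : List (String × String) :=
  let lines := (PySem.Str.split? charter_text "\n").getD []
  let prelude_ := lines.takeWhile (fun l => !pvIsHeader l)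
  let rest := lines.dropWhile (fun l => !pvIsHeader l)
  (pvSections (pvApplySpecials PySem.Dict.empty prelude_) rest).items

-- ===== PRECONDITION & SPEC =====
def Spec_parse_charter_to_form_data (charter_text : String) (out : List (String × String)) : Prop := out = parse_charter_to_form_data_alt charter_text
instance (charter_text : String) (out : List (String × String)) : Decidable (Spec_parse_charter_to_form_data charter_text out) := by unfold Spec_parse_charter_to_form_data; infer_instance

-- ===== CLAIM (what is proved, stated in full; the proofs are below) =====
def Claim_equal_parse_charter_to_form_data : Prop := ∀ (charter_text : String), Dom_parse_charter_to_form_data charter_text → Spec_parse_charter_to_form_data charter_text (parse_charter_to_form_data charter_text)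

-- ===== LEMMAS AND PROOFS =====

-- A's flush on an in-section state is exactly B's conditional section write
theorem pv_flushA_some (d : PySem.Dict String String) (k : String) (buf : List String) :
    pvFlushA (d, some k, buf) = pvFlushB d k buf := rfl

theorem pv_flushA_none (d : PySem.Dict String String) (buf : List String) :
    pvFlushA (d, none, buf) = d := rfl

theorem pv_flushB_empty_key (d : PySem.Dict String String) (c : List String) :
    pvFlushB d "" c = d := by simp [pvFlushB]

theorem pvApplySpecials_nil (d : PySem.Dict String String) : pvApplySpecials d [] = d := rfl

theorem pvApplySpecials_cons_some (d : PySem.Dict String String) (l : String) (b : List String)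
    (k v : String) (h : pvSpecial l = some (k, v)) :
    pvApplySpecials d (l :: b) = pvApplySpecials (d.insert k v) b := by
  simp [pvApplySpecials, h]

theorem pvApplySpecials_cons_none (d : PySem.Dict String String) (l : String) (b : List String)
    (h : pvSpecial l = none) : pvApplySpecials d (l :: b) = pvApplySpecials d b := by
  simp [pvApplySpecials, h]

theorem pvSections_nil (d : PySem.Dict String String) : pvSections d [] = d := by
  rw [pvSections.eq_def]

theorem pvSections_cons (d : PySem.Dict String String) (h : String) (rest : List String) :
    pvSections d (h :: rest) =
      pvSections
        (pvFlushB (pvApplySpecials d (rest.takeWhile (fun l => !pvIsHeader l))) (pvSecKey h)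
          ((rest.takeWhile (fun l => !pvIsHeader l)).filter pvKeep))
        (rest.dropWhile (fun l => !pvIsHeader l)) := by
  rw [pvSections.eq_def]

-- a line cannot start with two incompatible prefixes
theorem pv_not_both (p q s : String) (hlen : p.toList.length ≤ q.toList.length)
    (hnp : ¬ p.toList <+: q.toList) (hp : PySem.Str.startswith s p = true) :
    PySem.Str.startswith s q = false := by
  cases hq : PySem.Str.startswith s q
  · rfl
  · exact absurd (List.prefix_of_prefix_length_le
      ((PySem.Chars.startswith_iff _ _).mp (by rw [← PySem.Str.startswith_eq]; exact hp))
      ((PySem.Chars.startswith_iff _ _).mp (by rw [← PySem.Str.startswith_eq]; exact hq)) hlen) hnp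

theorem pv_title_not_header {l : String}
    (h : PySem.Str.startswith l "# Project Charter:" = true) : pvIsHeader l = false := by
  cases hh : pvIsHeader l
  · rfl
  · have hf := pv_not_both "## " "# Project Charter:" l (by decide) (by decide) hh
    rw [hf] at h; cases h

theorem pv_owner_not_header {l : String}
    (h : PySem.Str.startswith l "**Project Owner:**" = true) : pvIsHeader l = false := by
  cases hh : pvIsHeader l
  · rfl
  · have hf := pv_not_both "## " "**Project Owner:**" l (by decide) (by decide) hh
    rw [hf] at h; cases h

theorem pv_type_not_header {l : String}
    (h : PySem.Str.startswith l "**Project Type:**" = true) : pvIsHeader l = false := by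
  cases hh : pvIsHeader l
  · rfl
  · have hf := pv_not_both "## " "**Project Type:**" l (by decide) (by decide) hh
    rw [hf] at h; cases h

theorem pv_sec_lemma (ls : List String) :
    ∀ (data : PySem.Dict String String) (k : String) (buf : List String), (k = "" → buf = []) →
    pvFlushA (ls.foldl pvStepA (data, some k, buf)) =
      pvSections
        (pvFlushB (pvApplySpecials data (ls.takeWhile (fun l => !pvIsHeader l))) k
          (buf ++ (ls.takeWhile (fun l => !pvIsHeader l)).filter pvKeep))
        (ls.dropWhile (fun l => !pvIsHeader l)) := by
  induction ls with
  | nil =>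
    intro d k buf _
    rw [List.foldl_nil, List.takeWhile_nil, List.dropWhile_nil, pvApplySpecials_nil,
      List.filter_nil, List.append_nil, pvSections_nil, pv_flushA_some]
  | cons l t ih =>
    intro d k buf hk
    by_cases hT : PySem.Str.startswith l "# Project Charter:" = true
    · have hH : pvIsHeader l = false := pv_title_not_header hT
      simp at hT
      have hSp : pvSpecial l
          = some ("project_title", PySem.Str.strip (PySem.Str.replace l "# Project Charter:" "")) := by
        simp [pvSpecial, hT]
      have hKp : pvKeep l = false := by simp [pvKeep, hSp]
      have hstep : pvStepA (d, some k, buf) l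
          = (d.insert "project_title" (PySem.Str.strip (PySem.Str.replace l "# Project Charter:" "")),
             some k, buf) := by simp [pvStepA, hT]
      rw [List.foldl_cons, hstep, ih _ k buf hk,
        List.takeWhile_cons, List.dropWhile_cons]
      simp only [hH, Bool.not_false, if_true]
      rw [pvApplySpecials_cons_some _ _ _ _ _ hSp, List.filter_cons]
      simp only [hKp, Bool.false_eq_true, if_false]
    · by_cases hO : PySem.Str.startswith l "**Project Owner:**" = true
      · have hH : pvIsHeader l = false := pv_owner_not_header hO
        simp at hT hO
        have hSp : pvSpecial l
            = some ("project_owner", PySem.Str.strip (PySem.Str.replace l "**Project Owner:**" "")) := by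
          simp [pvSpecial, hT, hO]
        have hKp : pvKeep l = false := by simp [pvKeep, hSp]
        have hstep : pvStepA (d, some k, buf) l
            = (d.insert "project_owner" (PySem.Str.strip (PySem.Str.replace l "**Project Owner:**" "")),
               some k, buf) := by simp [pvStepA, hT, hO]
        rw [List.foldl_cons, hstep, ih _ k buf hk,
          List.takeWhile_cons, List.dropWhile_cons]
        simp only [hH, Bool.not_false, if_true]
        rw [pvApplySpecials_cons_some _ _ _ _ _ hSp, List.filter_cons]
        simp only [hKp, Bool.false_eq_true, if_false]
      · by_cases hP : PySem.Str.startswith l "**Project Type:**" = true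
        · have hH : pvIsHeader l = false := pv_type_not_header hP
          simp at hT hO hP
          have hSp : pvSpecial l
              = some ("project_type", PySem.Str.strip (PySem.Str.replace l "**Project Type:**" "")) := by
            simp [pvSpecial, hT, hO, hP]
          have hKp : pvKeep l = false := by simp [pvKeep, hSp]
          have hstep : pvStepA (d, some k, buf) l
              = (d.insert "project_type" (PySem.Str.strip (PySem.Str.replace l "**Project Type:**" "")),
                 some k, buf) := by simp [pvStepA, hT, hO, hP]
          rw [List.foldl_cons, hstep, ih _ k buf hk,
            List.takeWhile_cons, List.dropWhile_cons]
          simp only [hH, Bool.not_false, if_true]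
          rw [pvApplySpecials_cons_some _ _ _ _ _ hSp, List.filter_cons]
          simp only [hKp, Bool.false_eq_true, if_false]
        · by_cases hH : pvIsHeader l = true
          · -- header line: A flushes and restarts; B closes the current block
            have hraw : PySem.Str.startswith l "## " = true := hH
            simp at hT hO hP hraw
            have hstep : pvStepA (d, some k, buf) l
                = (pvFlushA (d, some k, buf), some (pvSecKey l), []) := by
              simp [pvStepA, hT, hO, hP, hraw, pvSecKey]
            rw [List.foldl_cons, hstep, ih _ _ [] (fun _ => rfl), pv_flushA_some,
              List.takeWhile_cons, List.dropWhile_cons]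
            simp only [hH, Bool.not_true, Bool.false_eq_true, if_false]
            rw [pvSections_cons, pvApplySpecials_nil, List.filter_nil, List.append_nil,
              List.nil_append]
          · -- ordinary line
            have hH' : pvIsHeader l = false := by
              cases h : pvIsHeader l; rfl; exact absurd h hH
            have hraw : PySem.Str.startswith l "## " = false := hH'
            simp at hT hO hP hraw
            have hSp : pvSpecial l = none := by simp [pvSpecial, hT, hO, hP]
            by_cases hs : PySem.Str.strip l = ""
            · -- blank line: dropped on both sides
              have hKp : pvKeep l = false := by simp [pvKeep, hs]
              have hstep : pvStepA (d, some k, buf) l = (d, some k, buf) := by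
                simp [pvStepA, hT, hO, hP, hraw, hs]
              rw [List.foldl_cons, hstep, ih _ k buf hk,
                List.takeWhile_cons, List.dropWhile_cons]
              simp only [hH', Bool.not_false, if_true]
              rw [pvApplySpecials_cons_none _ _ _ hSp, List.filter_cons]
              simp only [hKp, Bool.false_eq_true, if_false]
            · by_cases hk0 : k = ""
              · -- unnamed section: A buffers nothing, B's write is suppressed
                subst hk0
                have hbuf := hk rfl; subst hbuf
                have hstep : pvStepA (d, some "", []) l = (d, some "", []) := by
                  simp [pvStepA, hT, hO, hP, hraw, pvTruthy]
                rw [List.foldl_cons, hstep, ih _ "" [] (fun _ => rfl),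
                  List.takeWhile_cons, List.dropWhile_cons]
                simp only [hH', Bool.not_false, if_true]
                rw [pvApplySpecials_cons_none _ _ _ hSp, pv_flushB_empty_key,
                  pv_flushB_empty_key]
              · -- content line: appended to the buffer / kept by the filter
                have hKp : pvKeep l = true := by simp [pvKeep, hSp, hs]
                have hstep : pvStepA (d, some k, buf) l = (d, some k, buf ++ [l]) := by
                  simp [pvStepA, hT, hO, hP, hraw, pvTruthy, hk0, hs]
                rw [List.foldl_cons, hstep, ih _ k (buf ++ [l]) (fun h => absurd h hk0),
                  List.takeWhile_cons, List.dropWhile_cons]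
                simp only [hH', Bool.not_false, if_true]
                rw [pvApplySpecials_cons_none _ _ _ hSp, List.filter_cons]
                simp only [hKp, if_true]
                simp

theorem pv_top_lemma (ls : List String) :
    ∀ (data : PySem.Dict String String),
    pvFlushA (ls.foldl pvStepA (data, none, [])) =
      pvSections (pvApplySpecials data (ls.takeWhile (fun l => !pvIsHeader l)))
        (ls.dropWhile (fun l => !pvIsHeader l)) := by
  induction ls with
  | nil =>
    intro d
    rw [List.foldl_nil, List.takeWhile_nil, List.dropWhile_nil, pvApplySpecials_nil,
      pvSections_nil, pv_flushA_none]
  | cons l t ih =>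
    intro d
    by_cases hT : PySem.Str.startswith l "# Project Charter:" = true
    · have hH : pvIsHeader l = false := pv_title_not_header hT
      simp at hT
      have hSp : pvSpecial l
          = some ("project_title", PySem.Str.strip (PySem.Str.replace l "# Project Charter:" "")) := by
        simp [pvSpecial, hT]
      have hstep : pvStepA (d, none, []) l
          = (d.insert "project_title" (PySem.Str.strip (PySem.Str.replace l "# Project Charter:" "")),
             none, []) := by simp [pvStepA, hT]
      rw [List.foldl_cons, hstep, ih, List.takeWhile_cons, List.dropWhile_cons]
      simp only [hH, Bool.not_false, if_true]
      rw [pvApplySpecials_cons_some _ _ _ _ _ hSp]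
    · by_cases hO : PySem.Str.startswith l "**Project Owner:**" = true
      · have hH : pvIsHeader l = false := pv_owner_not_header hO
        simp at hT hO
        have hSp : pvSpecial l
            = some ("project_owner", PySem.Str.strip (PySem.Str.replace l "**Project Owner:**" "")) := by
          simp [pvSpecial, hT, hO]
        have hstep : pvStepA (d, none, []) l
            = (d.insert "project_owner" (PySem.Str.strip (PySem.Str.replace l "**Project Owner:**" "")),
               none, []) := by simp [pvStepA, hT, hO]
        rw [List.foldl_cons, hstep, ih, List.takeWhile_cons, List.dropWhile_cons]
        simp only [hH, Bool.not_false, if_true]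
        rw [pvApplySpecials_cons_some _ _ _ _ _ hSp]
      · by_cases hP : PySem.Str.startswith l "**Project Type:**" = true
        · have hH : pvIsHeader l = false := pv_type_not_header hP
          simp at hT hO hP
          have hSp : pvSpecial l
              = some ("project_type", PySem.Str.strip (PySem.Str.replace l "**Project Type:**" "")) := by
            simp [pvSpecial, hT, hO, hP]
          have hstep : pvStepA (d, none, []) l
              = (d.insert "project_type" (PySem.Str.strip (PySem.Str.replace l "**Project Type:**" "")),
                 none, []) := by simp [pvStepA, hT, hO, hP]
          rw [List.foldl_cons, hstep, ih, List.takeWhile_cons, List.dropWhile_cons]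
          simp only [hH, Bool.not_false, if_true]
          rw [pvApplySpecials_cons_some _ _ _ _ _ hSp]
        · by_cases hH : pvIsHeader l = true
          · have hraw : PySem.Str.startswith l "## " = true := hH
            simp at hT hO hP hraw
            have hstep : pvStepA (d, none, []) l
                = (pvFlushA (d, none, []), some (pvSecKey l), []) := by
              simp [pvStepA, hT, hO, hP, hraw, pvSecKey]
            rw [List.foldl_cons, hstep, pv_flushA_none,
              pv_sec_lemma _ _ _ [] (fun _ => rfl),
              List.takeWhile_cons, List.dropWhile_cons]
            simp only [hH, Bool.not_true, Bool.false_eq_true, if_false]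
            rw [pvSections_cons, pvApplySpecials_nil, List.nil_append]
          · have hH' : pvIsHeader l = false := by
              cases h : pvIsHeader l; rfl; exact absurd h hH
            have hraw : PySem.Str.startswith l "## " = false := hH'
            simp at hT hO hP hraw
            have hSp : pvSpecial l = none := by simp [pvSpecial, hT, hO, hP]
            have hstep : pvStepA (d, none, []) l = (d, none, []) := by
              simp [pvStepA, hT, hO, hP, hraw, pvTruthy]
            rw [List.foldl_cons, hstep, ih, List.takeWhile_cons, List.dropWhile_cons]
            simp only [hH', Bool.not_false, if_true]
            rw [pvApplySpecials_cons_none _ _ _ hSp]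

-- ===== VERDICT (by name: the statement is the Claim_ definition above) =====
theorem parse_charter_to_form_data_spec : Claim_equal_parse_charter_to_form_data := by
  intro s _
  unfold Spec_parse_charter_to_form_data parse_charter_to_form_data parse_charter_to_form_data_alt
  exact congrArg PySem.Dict.items (pv_top_lemma _ _)
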